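-- pv_equiv track=rewrite | github.com/sonambharti/Python | Heap/mostPopularCreator.py | mostPopularCreator_heap
-- ===== SOURCE A (Python) =====
-- def mostPopularCreator_heap(creators, ids, views):
--     mapped_data = {}
--     highest_popularity = 0
--     for creator, id, view in zip(creators, ids, views):
--         if not creator in mapped_data:
--             mapped_data[creator] = [view, id, view]
--         else:
--             prev = mapped_data[creator]
--             prev[0] += view
--             if (prev[2] == view and prev[1] > id) or (prev[2] < view):
--                 prev[1] = id
--             if prev[2] < view:
--                 prev[2] = view
--         highest_popularity = max(highest_popularity, mapped_data[creator][0])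
--
--     result = []
--     for creator, [view, id, id_value] in mapped_data.items():
--         if view == highest_popularity:
--             result.append([creator, id])
--     return result
-- ===== SOURCE B (Python) =====
-- def mostPopularCreator_heap(creators, ids, views):
--     data = {}
--     highest = 0
--     for creator, id, view in zip(creators, ids, views):
--         if creator not in data:
--             data[creator] = [view, [(view, id)]]
--         else:
--             data[creator][0] += view
--             data[creator][1].append((view, id))
--         highest = max(highest, data[creator][0])
--     result = []
--     for creator, (total, entries) in data.items():
--         if total == highest:
--             best_view = max(v for v, _ in entries)
--             best_id = min(i for v, i in entries if v == best_view)
--             result.append([creator, best_id])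
--     return result
-- ===== Notes on version B (the rewrite author's own statement) =====
-- stated objective: alternative
-- what changed: B groups each creator's (view, id) entries into a stored list during the single zip pass and computes the tie-break (max view, then min id) in a separate reduction pass over that list, instead of A's incrementally maintained [total, best_id, max_view] slot.
import Mathlib
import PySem

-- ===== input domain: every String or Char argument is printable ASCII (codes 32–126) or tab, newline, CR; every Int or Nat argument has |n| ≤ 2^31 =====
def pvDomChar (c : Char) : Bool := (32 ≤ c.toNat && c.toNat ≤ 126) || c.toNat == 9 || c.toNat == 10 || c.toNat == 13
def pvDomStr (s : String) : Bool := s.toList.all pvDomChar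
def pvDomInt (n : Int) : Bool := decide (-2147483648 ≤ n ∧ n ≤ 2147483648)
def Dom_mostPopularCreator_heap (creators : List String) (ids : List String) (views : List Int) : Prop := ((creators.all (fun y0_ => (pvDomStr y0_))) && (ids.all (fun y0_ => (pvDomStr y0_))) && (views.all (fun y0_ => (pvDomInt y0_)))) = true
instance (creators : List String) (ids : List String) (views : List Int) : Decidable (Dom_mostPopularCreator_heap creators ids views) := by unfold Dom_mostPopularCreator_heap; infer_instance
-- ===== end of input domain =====

-- B replaces A's incremental [total, best_id, max_view] slot by a grouped list of (view, id)
-- per creator plus a separate reduction pass for the tie-break (objective: alternative decomposition).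

-- ===== PORT A =====
-- one iteration of A's zip loop: state = (mapped_data, highest_popularity)
def mpcAStep (st : PySem.Dict String (Int × String × Int) × Int) (t : String × String × Int) :
    PySem.Dict String (Int × String × Int) × Int :=
  let creator := t.1; let id := t.2.1; let view := t.2.2
  let d :=
    match st.1.get? creator with
    | none => st.1.insert creator (view, id, view)
    | some prev =>
        let bid := if (prev.2.2 == view && decide (id < prev.2.1)) || decide (prev.2.2 < view) then id else prev.2.1
        let mv := if prev.2.2 < view then view else prev.2.2
        st.1.insert creator (prev.1 + view, bid, mv)
  (d, max st.2 (d.getD creator (0, "", 0)).1)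

def mostPopularCreator_heap (creators : List String) (ids : List String) (views : List Int) : List (List String) :=
  let fin := (creators.zip (ids.zip views)).foldl mpcAStep (PySem.Dict.empty, 0)
  fin.1.items.foldl (fun res p => if p.2.1 == fin.2 then res ++ [[p.1, p.2.2.1]] else res) []

-- ===== PORT B =====
-- one iteration of B's zip loop: state = (data : creator -> (total, entries), highest)
def mpcBStep (st : PySem.Dict String (Int × List (Int × String)) × Int) (t : String × String × Int) :
    PySem.Dict String (Int × List (Int × String)) × Int :=
  let creator := t.1; let id := t.2.1; let view := t.2.2
  let d :=
    match st.1.get? creator with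
    | none => st.1.insert creator (view, [(view, id)])
    | some p => st.1.insert creator (p.1 + view, p.2 ++ [(view, id)])
  (d, max st.2 (d.getD creator (0, [])).1)

-- best_view = max(v for v,_ in entries); best_id = min(i for v,i in entries if v == best_view)
def mpcSelect (entries : List (Int × String)) : Option String :=
  match PySem.List.max? entries (fun e => e.1) with
  | none => none
  | some m => PySem.List.min? (entries.filterMap (fun e => if e.1 == m.1 then some e.2 else none)) (fun x => x)

def mostPopularCreator_heap_alt (creators : List String) (ids : List String) (views : List Int) : List (List String) :=
  let fin := (creators.zip (ids.zip views)).foldl mpcBStep (PySem.Dict.empty, 0)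
  fin.1.items.foldl (fun res p =>
    if p.2.1 == fin.2 then
      match mpcSelect p.2.2 with
      | some bid => res ++ [[p.1, bid]]
      | none => res
    else res) []

-- ===== PRECONDITION & SPEC =====
def Spec_mostPopularCreator_heap (creators : List String) (ids : List String) (views : List Int) (out : List (List String)) : Prop := out = mostPopularCreator_heap_alt creators ids views
instance (creators : List String) (ids : List String) (views : List Int) (out : List (List String)) : Decidable (Spec_mostPopularCreator_heap creators ids views out) := by unfold Spec_mostPopularCreator_heap; infer_instance

-- ===== CLAIM (what is proved, stated in full; the proofs are below) =====
def Claim_equal_mostPopularCreator_heap : Prop := ∀ (creators : List String) (ids : List String) (views : List Int), Dom_mostPopularCreator_heap creators ids views → Spec_mostPopularCreator_heap creators ids views (mostPopularCreator_heap creators ids views)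

-- ===== LEMMAS AND PROOFS =====

-- A's slot update as a pure function of the slot and one (view, id) entry
def mpcG (s : Int × String × Int) (e : Int × String) : Int × String × Int :=
  (s.1 + e.1,
   (if (s.2.2 == e.1 && decide (e.2 < s.2.1)) || decide (s.2.2 < e.1) then e.2 else s.2.1),
   (if s.2.2 < e.1 then e.1 else s.2.2))

-- A's slot as a function of B's stored entry list
def mpcF : List (Int × String) → Int × String × Int
  | [] => (0, "", 0)
  | e :: rest => rest.foldl mpcG (e.1, e.2, e.1)

lemma mpcF_append (es : List (Int × String)) (h : es ≠ []) (x : Int × String) :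
    mpcF (es ++ [x]) = mpcG (mpcF es) x := by
  cases es with
  | nil => exact absurd rfl h
  | cons e rest => simp [mpcF, List.foldl_append]

-- the relational invariant between A's dict and B's dict
def mpcRel (dA : PySem.Dict String (Int × String × Int)) (dB : PySem.Dict String (Int × List (Int × String))) : Prop :=
  dA.items = dB.items.map (fun p => (p.1, mpcF p.2.2)) ∧
  (∀ p ∈ dB.items, p.2.2 ≠ [] ∧ p.2.1 = (mpcF p.2.2).1) ∧
  dB.keys.Nodup

lemma mpc_get?_map (l : List (String × (Int × List (Int × String)))) (k : String) :
    (PySem.Dict.mk (l.map (fun p => (p.1, mpcF p.2.2)))).get? k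
      = ((PySem.Dict.mk l).get? k).map (fun p => mpcF p.2) := by
  induction l with
  | nil => rfl
  | cons q rest ih =>
      obtain ⟨qk, qv⟩ := q
      simp only [List.map_cons]
      rw [PySem.Dict.get?_mk_cons, PySem.Dict.get?_mk_cons]
      by_cases hq : (qk == k) = true
      · simp [hq]
      · simp only [hq] at *
        simpa [hq] using ih

lemma mpcRel_get? {dA : PySem.Dict String (Int × String × Int)}
    {dB : PySem.Dict String (Int × List (Int × String))}
    (h : mpcRel dA dB) (k : String) :
    dA.get? k = (dB.get? k).map (fun p => mpcF p.2) := by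
  obtain ⟨h1, _, _⟩ := h
  have hA : dA = PySem.Dict.mk (dB.items.map (fun p => (p.1, mpcF p.2.2))) := PySem.Dict.ext h1
  have hBisB : dB = PySem.Dict.mk dB.items := PySem.Dict.ext rfl
  rw [hA]
  conv_rhs => rw [hBisB]
  exact mpc_get?_map dB.items k

-- the unique payload at a key, from Nodup keys
lemma mpc_unique_payload {dB : PySem.Dict String (Int × List (Int × String))}
    (h3 : dB.keys.Nodup) {k : String} {p : Int × List (Int × String)}
    (hB : dB.get? k = some p) {q : String × (Int × List (Int × String))}
    (hq : q ∈ dB.items) (hqk : q.1 = k) : q.2 = p := by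
  have := PySem.Dict.get?_of_mem_items dB (k := q.1) (v := q.2) (by simpa using hq) h3
  rw [hqk, hB] at this
  exact (Option.some.injEq _ _).mp this.symm

lemma mpcStep_rel {dA : PySem.Dict String (Int × String × Int)}
    {dB : PySem.Dict String (Int × List (Int × String))}
    (h : mpcRel dA dB) (hp : Int) (t : String × String × Int) :
    mpcRel (mpcAStep (dA, hp) t).1 (mpcBStep (dB, hp) t).1 ∧
    (mpcAStep (dA, hp) t).2 = (mpcBStep (dB, hp) t).2 := by
  obtain ⟨h1, h2, h3⟩ := h
  have hget := mpcRel_get? ⟨h1, h2, h3⟩ t.1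
  cases hB : dB.get? t.1 with
  | none =>
      have hA : dA.get? t.1 = none := by rw [hget, hB]; rfl
      have hcB : dB.contains t.1 = false := (PySem.Dict.get?_eq_none_iff_contains dB t.1).mp hB
      have hcA : dA.contains t.1 = false := (PySem.Dict.get?_eq_none_iff_contains dA t.1).mp hA
      simp only [mpcAStep, mpcBStep, hA, hB]
      refine ⟨⟨?_, ?_, ?_⟩, ?_⟩
      · rw [PySem.Dict.items_insert_of_not_contains dA _ hcA,
            PySem.Dict.items_insert_of_not_contains dB _ hcB, h1]
        simp [mpcF]
      · intro p hpmem
        rw [PySem.Dict.items_insert_of_not_contains dB _ hcB] at hpmem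
        rcases List.mem_append.mp hpmem with hold | hnew
        · exact h2 p hold
        · have : p = (t.1, (t.2.2, [(t.2.2, t.2.1)])) := by simpa using hnew
          subst this
          exact ⟨by simp, by simp [mpcF]⟩
      · exact PySem.Dict.nodup_keys_insert _ _ _ h3
      · simp [PySem.Dict.getD_insert_self]
  | some p =>
      have hA : dA.get? t.1 = some (mpcF p.2) := by rw [hget, hB]; rfl
      have hcB : dB.contains t.1 = true := by
        cases hc : dB.contains t.1
        · rw [(PySem.Dict.get?_eq_none_iff_contains dB t.1).mpr hc] at hB; cases hB
        · rfl
      have hcA : dA.contains t.1 = true := by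
        cases hc : dA.contains t.1
        · rw [(PySem.Dict.get?_eq_none_iff_contains dA t.1).mpr hc] at hA; cases hA
        · rfl
      have hmem : (t.1, p) ∈ dB.items := PySem.Dict.mem_items_of_get?_eq_some dB hB
      obtain ⟨hne, htot⟩ := h2 (t.1, p) hmem
      simp only at hne htot
      simp only [mpcAStep, mpcBStep, hA, hB]
      refine ⟨⟨?_, ?_, ?_⟩, ?_⟩
      · rw [PySem.Dict.items_insert_of_contains dA _ hcA,
            PySem.Dict.items_insert_of_contains dB _ hcB, h1]
        simp only [List.map_map]
        apply List.map_congr_left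
        intro q hq
        by_cases hqk : q.1 = t.1
        · have hq2 : q.2 = p := mpc_unique_payload h3 hB hq hqk
          simp only [Function.comp_apply, hqk, beq_self_eq_true, if_pos, hq2]
          have := mpcF_append p.2 hne (t.2.2, t.2.1)
          simp only [this, mpcG]
        · simp [Function.comp_apply, hqk]
      · intro q hqmem
        rw [PySem.Dict.items_insert_of_contains dB _ hcB] at hqmem
        rcases List.mem_map.mp hqmem with ⟨r, hr, hrq⟩
        by_cases hrk : (r.1 == t.1) = true
        · rw [if_pos hrk] at hrq
          subst hrq
          constructor
          · simp
          · have := mpcF_append p.2 hne (t.2.2, t.2.1)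
            simp only [this, mpcG, htot]
        · rw [if_neg hrk] at hrq
          subst hrq
          exact h2 r hr
      · have : (dB.insert t.1 (p.1 + t.2.2, p.2 ++ [(t.2.2, t.2.1)])).keys.Nodup :=
          PySem.Dict.nodup_keys_insert _ _ _ h3
        exact this
      · simp [PySem.Dict.getD_insert_self, htot]

lemma mpcFold_rel (l : List (String × String × Int)) :
    ∀ dA dB (hp : Int), mpcRel dA dB →
    mpcRel (l.foldl mpcAStep (dA, hp)).1 (l.foldl mpcBStep (dB, hp)).1 ∧
    (l.foldl mpcAStep (dA, hp)).2 = (l.foldl mpcBStep (dB, hp)).2 := by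
  induction l with
  | nil => intro dA dB hp h; exact ⟨h, rfl⟩
  | cons t ts ih =>
      intro dA dB hp h
      obtain ⟨h1, h2⟩ := mpcStep_rel h hp t
      simp only [List.foldl_cons]
      have hA : mpcAStep (dA, hp) t = ((mpcAStep (dA, hp) t).1, (mpcBStep (dB, hp) t).2) := by
        rw [← h2]
      have hB : mpcBStep (dB, hp) t = ((mpcBStep (dB, hp) t).1, (mpcBStep (dB, hp) t).2) := rfl
      rw [hA, hB]
      exact ih _ _ _ h1


-- properties of A's incremental slot over a nonempty entry list
lemma mpcF_props (e : Int × String) (rest : List (Int × String)) :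
    (∀ p ∈ e :: rest, p.1 ≤ (mpcF (e :: rest)).2.2) ∧
    ((mpcF (e :: rest)).2.2, (mpcF (e :: rest)).2.1) ∈ e :: rest ∧
    (∀ p ∈ e :: rest, p.1 = (mpcF (e :: rest)).2.2 → (mpcF (e :: rest)).2.1 ≤ p.2) := by
  induction rest using List.reverseRecOn with
  | nil =>
      refine ⟨?_, ?_, ?_⟩ <;> simp [mpcF]
  | append_singleton r x ih =>
      have hne : (e :: r) ≠ [] := by simp
      have hF : mpcF (e :: (r ++ [x])) = mpcG (mpcF (e :: r)) x := by
        have := mpcF_append (e :: r) hne x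
        simpa using this
      obtain ⟨ub, mem, mn⟩ := ih
      rw [show e :: (r ++ [x]) = (e :: r) ++ [x] by simp] at *
      rw [hF] at *
      simp only [mpcG]
      by_cases hlt : (mpcF (e :: r)).2.2 < x.1
      · simp only [if_pos hlt, decide_eq_true hlt, Bool.or_true, if_pos]
        refine ⟨?_, ?_, ?_⟩
        · intro q hq
          rcases List.mem_append.mp hq with hq | hq
          · exact le_of_lt (lt_of_le_of_lt (ub q hq) hlt)
          · simp at hq; subst hq; exact le_refl _
        · apply List.mem_append.mpr; right; simp
        · intro q hq hq1
          rcases List.mem_append.mp hq with hq | hq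
          · exact absurd (hq1 ▸ ub q hq) (not_le.mpr hlt)
          · simp at hq; subst hq; exact le_refl _
      · simp only [if_neg hlt]
        by_cases hc : ((mpcF (e :: r)).2.2 == x.1 && decide (x.2 < (mpcF (e :: r)).2.1)) = true
        · have hand := Bool.and_eq_true_iff.mp hc
          have heq : (mpcF (e :: r)).2.2 = x.1 := eq_of_beq hand.1
          have hlt2 : x.2 < (mpcF (e :: r)).2.1 := of_decide_eq_true hand.2
          simp only [hc, Bool.true_or, if_pos]
          refine ⟨?_, ?_, ?_⟩
          · intro q hq
            rcases List.mem_append.mp hq with hq | hq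
            · exact ub q hq
            · simp at hq; subst hq; exact le_of_eq heq.symm
          · apply List.mem_append.mpr; right; simp [heq]
          · intro q hq hq1
            rcases List.mem_append.mp hq with hq | hq
            · exact le_of_lt (lt_of_lt_of_le hlt2 (mn q hq hq1))
            · simp at hq; subst hq; exact le_refl _
        · have hcor : ((mpcF (e :: r)).2.2 == x.1 && decide (x.2 < (mpcF (e :: r)).2.1) || decide ((mpcF (e :: r)).2.2 < x.1)) = false := by
            simp only [Bool.or_eq_false_iff]
            exact ⟨by simpa using hc, by simpa using hlt⟩
          simp only [hcor, Bool.false_eq_true, if_false]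
          refine ⟨?_, ?_, ?_⟩
          · intro q hq
            rcases List.mem_append.mp hq with hq | hq
            · exact ub q hq
            · simp at hq; subst hq; exact not_lt.mp hlt
          · exact List.mem_append.mpr (Or.inl mem)
          · intro q hq hq1
            rcases List.mem_append.mp hq with hq | hq
            · exact mn q hq hq1
            · simp at hq; subst hq
              have hnlt : ¬ q.2 < (mpcF (e :: r)).2.1 := by
                intro hx
                exact hc (by rw [hq1]; simp [hx])
              exact not_lt.mp hnlt

-- B's two-stage reduction returns exactly A's incrementally maintained id
lemma mpcSelect_eq (es : List (Int × String)) (h : es ≠ []) :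
    mpcSelect es = some (mpcF es).2.1 := by
  obtain ⟨e, rest, rfl⟩ := List.exists_cons_of_ne_nil h
  obtain ⟨ub, mem, mn⟩ := mpcF_props e rest
  cases hm : PySem.List.max? (e :: rest) (fun q => q.1) with
  | none =>
      rw [PySem.List.max?_eq_none_iff] at hm
      cases hm
  | some m =>
      have hm1 : m.1 = (mpcF (e :: rest)).2.2 := by
        have h1 : m.1 ≤ (mpcF (e :: rest)).2.2 := ub m (PySem.List.max?_mem hm)
        have h2 : (mpcF (e :: rest)).2.2 ≤ m.1 :=
          PySem.List.max?_isMax hm ((mpcF (e :: rest)).2.2, (mpcF (e :: rest)).2.1) mem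
        exact le_antisymm h1 h2
      simp only [mpcSelect, hm, hm1]
      have hbidmem : (mpcF (e :: rest)).2.1 ∈
          (e :: rest).filterMap (fun q => if q.1 == (mpcF (e :: rest)).2.2 then some q.2 else none) :=
        List.mem_filterMap.mpr ⟨((mpcF (e :: rest)).2.2, (mpcF (e :: rest)).2.1), mem, by simp⟩
      cases hmin : PySem.List.min?
          ((e :: rest).filterMap (fun q => if q.1 == (mpcF (e :: rest)).2.2 then some q.2 else none))
          (fun x => x) with
      | none =>
          rw [PySem.List.min?_eq_none_iff] at hmin
          rw [hmin] at hbidmem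
          cases hbidmem
      | some μ =>
          have hle : μ ≤ (mpcF (e :: rest)).2.1 := PySem.List.min?_isMin hmin _ hbidmem
          have hge : (mpcF (e :: rest)).2.1 ≤ μ := by
            have hμmem := PySem.List.min?_mem hmin
            rcases List.mem_filterMap.mp hμmem with ⟨q, hq, hqv⟩
            by_cases hq1 : (q.1 == (mpcF (e :: rest)).2.2) = true
            · rw [if_pos hq1] at hqv
              have hq2 : q.2 = μ := by simpa using hqv
              exact hq2 ▸ mn q hq (by simpa using hq1)
            · rw [if_neg hq1] at hqv
              cases hqv
          rw [le_antisymm hle hge]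

theorem mpc_main (creators ids : List String) (views : List Int) :
    mostPopularCreator_heap creators ids views = mostPopularCreator_heap_alt creators ids views := by
  have h0 : mpcRel PySem.Dict.empty PySem.Dict.empty :=
    ⟨rfl, fun p hp => absurd hp (List.not_mem_nil), List.nodup_nil⟩
  obtain ⟨⟨h1, h2, h3⟩, hh⟩ :=
    mpcFold_rel (creators.zip (ids.zip views)) PySem.Dict.empty PySem.Dict.empty 0 h0
  simp only [mostPopularCreator_heap, mostPopularCreator_heap_alt]
  rw [h1, hh, List.foldl_map]
  apply PySem.List.foldl_congr_mem
  intro acc p hpm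
  obtain ⟨hne, htot⟩ := h2 p hpm
  rw [mpcSelect_eq p.2.2 hne]
  simp [htot]

-- ===== VERDICT (by name: the statement is the Claim_ definition above) =====
theorem mostPopularCreator_heap_spec : Claim_equal_mostPopularCreator_heap := by
  intro creators ids views _
  exact mpc_main creators ids views
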